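-- pv_equiv track=rewrite | github.com/minkyu-shim/ai-code-repair | datasets/mini_bugs/case_005/buggy.py | affected_by_change
-- ===== SOURCE A (Python) =====
-- def affected_by_change(
--     graph: dict[str, set[str]], changed: set[str]
-- ) -> set[str]:
--     """Return all targets that depend directly or transitively on `changed`.
--
--     The changed targets themselves are not included in the result.
--     """
--     affected: set[str] = set()
--     stack = list(changed)
--
--     while stack:
--         node = stack.pop()
--         for dep in graph.get(node, set()):
--             if dep in changed or dep in affected:
--                 continue
--             affected.add(dep)
--             stack.append(dep)
--
--     return affected
-- ===== SOURCE B (Python) =====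
-- def affected_by_change(
--     graph: dict[str, set[str]], changed: set[str]
-- ) -> set[str]:
--     """Recursive DFS instead of an explicit worklist stack.
--
--     Each visit first collects the not-yet-seen dependencies of a node
--     (marking them affected), then recurses into them; recursing in
--     reverse collection order makes the traversal deterministic (the
--     result is a set, so Python-visible behaviour does not depend on it).
--     """
--     affected: set[str] = set()
--
--     def visit(node: str) -> None:
--         new = []
--         for dep in graph.get(node, ()):
--             if dep in changed or dep in affected:
--                 continue
--             affected.add(dep)
--             new.append(dep)
--         for dep in reversed(new):
--             visit(dep)
--
--     for seed in reversed(list(changed)):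
--         visit(seed)
--
--     return affected
-- ===== Notes on version B (the rewrite author's own statement) =====
-- stated objective: alternative
-- what changed: Replaces the explicit LIFO worklist stack with a recursive depth-first search (an inner visit helper driven over the seeds), keeping the same skip conditions and marking discipline.
import Mathlib
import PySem

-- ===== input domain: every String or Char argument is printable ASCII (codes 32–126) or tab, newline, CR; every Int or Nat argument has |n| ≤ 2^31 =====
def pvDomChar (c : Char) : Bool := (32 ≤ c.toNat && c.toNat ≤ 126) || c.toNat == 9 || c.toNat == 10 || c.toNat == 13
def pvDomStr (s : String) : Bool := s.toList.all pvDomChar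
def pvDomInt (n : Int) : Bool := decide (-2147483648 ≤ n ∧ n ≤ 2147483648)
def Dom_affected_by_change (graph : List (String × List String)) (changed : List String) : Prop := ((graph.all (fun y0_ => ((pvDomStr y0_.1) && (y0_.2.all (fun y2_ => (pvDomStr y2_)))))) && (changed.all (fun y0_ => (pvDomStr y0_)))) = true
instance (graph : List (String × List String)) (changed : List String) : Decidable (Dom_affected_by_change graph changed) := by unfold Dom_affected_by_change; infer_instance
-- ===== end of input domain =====

-- B is a recursive DFS instead of A's explicit LIFO worklist stack; equal return value
-- (the Python return value is a set; both ports realise it as the same insertion-ordered list).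

-- ===== PORT A =====
-- `if dep in changed or dep in affected: continue / affected.add(dep); <seq>.append(dep)`
-- (the identical inner-loop body of both Pythons; A appends to the stack, B to `new`)
def pvSkipAdd (changed : List String) (st : PySem.Set String × List String) (dep : String) :
    PySem.Set String × List String :=
  if changed.contains dep || PySem.Set.contains st.1 dep then st
  else (PySem.Set.add st.1 dep, st.2 ++ [dep])

-- `while stack: node = stack.pop(); for dep in graph.get(node, set()): …`
-- fuel is a totality guard only: one unit per pop; the chosen budget always suffices.
def pvLoopA (graph : List (String × List String)) (changed : List String) :
    Nat → PySem.Set String → List String → PySem.Set String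
  | 0, aff, _ => aff
  | fuel + 1, aff, stack =>
    match PySem.List.pop? stack with
    | none => aff
    | some (node, rest) =>
      let deps := PySem.Dict.getD (PySem.Dict.mk graph) node []
      let r := deps.foldl (pvSkipAdd changed) (aff, rest)
      pvLoopA graph changed fuel r.1 r.2

def affected_by_change (graph : List (String × List String)) (changed : List String) : List String :=
  pvLoopA graph changed (changed.length + (graph.map (fun p => p.2.length)).sum + 1)
    PySem.Set.empty changed

-- ===== PORT B =====
-- `visit(node)` / the driver loop over the seeds.  pvVisit returns (affected, fuel left);
-- fuel is a totality guard only (one unit per visit; the `min` clamp in pvVisitAll is for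
-- termination and is the identity, see pvVisitAll_fuel_le).
mutual
def pvVisit (graph : List (String × List String)) (changed : List String) :
    Nat → String → PySem.Set String → PySem.Set String × Nat
  | 0, _, aff => (aff, 0)
  | fuel + 1, node, aff =>
    let deps := PySem.Dict.getD (PySem.Dict.mk graph) node []
    let r := deps.foldl (pvSkipAdd changed) (aff, [])
    pvVisitAll graph changed fuel r.2.reverse r.1
termination_by fuel _ _ => (fuel, 0)
decreasing_by exact Prod.Lex.left _ _ (Nat.lt_succ_self fuel)

def pvVisitAll (graph : List (String × List String)) (changed : List String) :
    Nat → List String → PySem.Set String → PySem.Set String × Nat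
  | fuel, [], aff => (aff, fuel)
  | fuel, n :: ns, aff =>
    let r := pvVisit graph changed fuel n aff
    pvVisitAll graph changed (min r.2 fuel) ns r.1
termination_by fuel l _ => (fuel, l.length + 1)
decreasing_by
  · exact Prod.Lex.right _ (by simp)
  · rcases Nat.lt_or_ge (min r.2 fuel) fuel with h | h
    · exact Prod.Lex.left _ _ h
    · have hm : min r.2 fuel = fuel := Nat.le_antisymm (Nat.min_le_right _ _) h
      rw [hm]; exact Prod.Lex.right _ (by simp)
end

def affected_by_change_alt (graph : List (String × List String)) (changed : List String) : List String :=
  (pvVisitAll graph changed (changed.length + (graph.map (fun p => p.2.length)).sum + 1)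
    changed.reverse PySem.Set.empty).1

-- ===== PRECONDITION & SPEC =====
def Spec_affected_by_change (graph : List (String × List String)) (changed : List String) (out : List String) : Prop := out = affected_by_change_alt graph changed
instance (graph : List (String × List String)) (changed : List String) (out : List String) : Decidable (Spec_affected_by_change graph changed out) := by unfold Spec_affected_by_change; infer_instance

-- ===== CLAIM (what is proved, stated in full; the proofs are below) =====
def Claim_equal_affected_by_change : Prop := ∀ (graph : List (String × List String)) (changed : List String), Dom_affected_by_change graph changed → Spec_affected_by_change graph changed (affected_by_change graph changed)

-- ===== LEMMAS AND PROOFS =====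

-- pvVisitAll never returns more fuel than it was given.
theorem pvVisitAll_fuel_le (graph : List (String × List String)) (changed : List String)
    (l : List String) : ∀ (fuel : Nat) (aff : PySem.Set String),
    (pvVisitAll graph changed fuel l aff).2 ≤ fuel := by
  induction l with
  | nil => intro fuel aff; simp [pvVisitAll]
  | cons n ns ih =>
    intro fuel aff
    rw [pvVisitAll]
    exact le_trans (ih _ _) (Nat.min_le_right _ _)

-- With zero fuel, nothing happens.
theorem pvVisitAll_zero (graph : List (String × List String)) (changed : List String)
    (l : List String) (aff : PySem.Set String) :
    pvVisitAll graph changed 0 l aff = (aff, 0) := by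
  induction l with
  | nil => simp [pvVisitAll]
  | cons n ns ih => rw [pvVisitAll, pvVisit]; simpa using ih

-- Sequencing: visiting l1 ++ l2 is visiting l1 then l2 with the fuel left over.
theorem pvVisitAll_append (graph : List (String × List String)) (changed : List String)
    (l1 l2 : List String) : ∀ (fuel : Nat) (aff : PySem.Set String),
    pvVisitAll graph changed fuel (l1 ++ l2) aff =
      pvVisitAll graph changed (pvVisitAll graph changed fuel l1 aff).2 l2
        (pvVisitAll graph changed fuel l1 aff).1 := by
  induction l1 with
  | nil => intro fuel aff; simp [pvVisitAll]
  | cons n ns ih =>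
    intro fuel aff
    rw [List.cons_append, pvVisitAll, pvVisitAll]
    exact ih _ _

-- The shared inner loop: running it with a non-empty accumulator just prefixes the accumulator.
theorem pvSkipAdd_foldl (changed : List String) (deps : List String) :
    ∀ (aff : PySem.Set String) (s : List String),
    deps.foldl (pvSkipAdd changed) (aff, s) =
      ((deps.foldl (pvSkipAdd changed) (aff, []) ).1,
        s ++ (deps.foldl (pvSkipAdd changed) (aff, []) ).2) := by
  induction deps with
  | nil => intro aff s; simp
  | cons d ds ih =>
    intro aff s
    simp only [List.foldl_cons]
    by_cases h : (changed.contains d || PySem.Set.contains aff d) = true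
    · simp only [pvSkipAdd, h, if_pos]
      exact ih aff s
    · simp only [pvSkipAdd, h, if_neg, Bool.not_eq_true]
      rw [ih _ (s ++ [d]), ih _ ([] ++ [d])]
      simp
-- The bridge: A's stack loop on the reversed list is B's visit sequence, fuel in lockstep.
theorem pvBridge (graph : List (String × List String)) (changed : List String) :
    ∀ (fuel : Nat) (l : List String) (aff : PySem.Set String),
    pvLoopA graph changed fuel aff l.reverse = (pvVisitAll graph changed fuel l aff).1 := by
  intro fuel
  induction fuel with
  | zero => intro l aff; rw [pvLoopA, pvVisitAll_zero]
  | succ fuel ih =>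
    intro l aff
    cases l with
    | nil => rw [pvLoopA]; simp [PySem.List.pop?, pvVisitAll]
    | cons n ns =>
      rw [pvLoopA, pvVisitAll, pvVisit]
      simp only [List.reverse_cons, PySem.List.pop?_last]
      rw [pvSkipAdd_foldl]
      have hrw : ns.reverse ++ (List.foldl (pvSkipAdd changed) (aff, [])
          (PySem.Dict.getD (PySem.Dict.mk graph) n [])).2 =
          ((List.foldl (pvSkipAdd changed) (aff, [])
          (PySem.Dict.getD (PySem.Dict.mk graph) n [])).2.reverse ++ ns).reverse := by
        simp
      rw [hrw, ih]
      rw [pvVisitAll_append]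
      have hle : (pvVisitAll graph changed fuel
          (List.foldl (pvSkipAdd changed) (aff, [])
            (PySem.Dict.getD (PySem.Dict.mk graph) n [])).2.reverse
          (List.foldl (pvSkipAdd changed) (aff, [])
            (PySem.Dict.getD (PySem.Dict.mk graph) n [])).1).2 ≤ fuel :=
        pvVisitAll_fuel_le _ _ _ _ _
      rw [Nat.min_eq_left (le_trans hle (Nat.le_succ _))]

-- ===== VERDICT (by name: the statement is the Claim_ definition above) =====
theorem affected_by_change_spec : Claim_equal_affected_by_change := by
  intro graph changed _
  unfold Spec_affected_by_change affected_by_change affected_by_change_alt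
  have h := pvBridge graph changed
    (changed.length + (graph.map (fun p => p.2.length)).sum + 1) changed.reverse PySem.Set.empty
  rw [List.reverse_reverse] at h
  exact h
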